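-- pv_equiv track=rewrite | github.com/AkashiSN/CHUNITHM-Rate-Calculator-Python | common/Function.py | CountRank
-- ===== SOURCE A (Python) =====
-- def CountRank(Musics):
--     rank = Musics[0]['Rank']
--     Musics[0]['Flag'] = rank
--     for Music in Musics:
--         if rank != Music['Rank']:
--             rank = Music['Rank']
--     Music['flag'] = rank
--     return Musics
-- ===== SOURCE B (Python) =====
-- def CountRank(Musics):
--     first = Musics[0]
--     first['Flag'] = first['Rank']
--     last = Musics[-1]
--     last['flag'] = last['Rank']
--     return Musics
-- ===== Notes on version B (the rewrite author's own statement) =====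
-- stated objective: simpler
-- what changed: Replaces A's whole rank-change scan loop (whose running 'rank' always ends equal to the last element's 'Rank', and whose leaked loop variable is the last element) by two direct assignments: Musics[0]['Flag'] = Musics[0]['Rank'] and Musics[-1]['flag'] = Musics[-1]['Rank'].
-- crash fix: On lists whose first and last dicts have a 'Rank' key but some dict lacks it, A raises KeyError in its scan loop while B returns the list with first['Flag'] and last['flag'] set. — e.g. on CountRank([[("Rank", "S")], [("a", "b")], [("Rank", "A")]]): A raises KeyError, B returns [[("Rank", "S"), ("Flag", "S")], [("a", "b")], [("Rank", "A"), ("flag", "A")]]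
import Mathlib
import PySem

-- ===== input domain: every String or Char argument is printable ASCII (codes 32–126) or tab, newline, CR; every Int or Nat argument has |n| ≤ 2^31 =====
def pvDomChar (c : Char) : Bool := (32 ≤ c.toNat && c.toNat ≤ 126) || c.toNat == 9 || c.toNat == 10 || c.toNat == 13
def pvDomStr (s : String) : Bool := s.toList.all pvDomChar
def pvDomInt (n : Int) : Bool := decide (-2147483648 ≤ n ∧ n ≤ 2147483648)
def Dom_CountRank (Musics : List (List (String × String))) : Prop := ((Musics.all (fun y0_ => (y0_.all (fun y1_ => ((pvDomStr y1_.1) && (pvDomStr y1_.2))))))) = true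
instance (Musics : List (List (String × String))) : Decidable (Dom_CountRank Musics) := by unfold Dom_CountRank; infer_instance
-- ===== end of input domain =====

-- B replaces A's whole rank-change scan by two direct assignments (first['Flag'], last['flag']),
-- because the loop's final rank always equals the last element's 'Rank'; both mutate the dicts in
-- place in Python and the same updated list is the return value proved equal here.

-- dict primitives over the association-list encoding (exact Python dict semantics via PySem.Dict)
def dGetD (m : List (String × String)) (k dflt : String) : String :=
  (PySem.Dict.mk m).getD k dflt
def dSet (m : List (String × String)) (k v : String) : List (String × String) :=
  ((PySem.Dict.mk m).insert k v).items

-- ===== PORT A =====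
def CountRank (Musics : List (List (String × String))) : List (List (String × String)) :=
  match Musics with
  | [] => []  -- Python raises IndexError here; excluded by Pre_CountRank
  | m0 :: rest =>
    -- rank = Musics[0]['Rank'];  Musics[0]['Flag'] = rank  (in-place update of element 0)
    let rank := dGetD m0 "Rank" ""
    let ms := dSet m0 "Flag" rank :: rest
    -- for Music in Musics: if rank != Music['Rank']: rank = Music['Rank']
    let rank := ms.foldl (fun r mu => if r ≠ dGetD mu "Rank" "" then dGetD mu "Rank" "" else r) rank
    -- after the loop 'Music' is the last element; Music['flag'] = rank mutates it in place
    ms.dropLast ++ [dSet (ms.getLastD []) "flag" rank]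

-- ===== PORT B =====
def CountRank_alt (Musics : List (List (String × String))) : List (List (String × String)) :=
  match Musics with
  | [] => []  -- Python B raises IndexError here; excluded by Pre_CountRank
  | [m] =>
    -- first and last are the same dict: it receives 'Flag' then 'flag'
    let m := dSet m "Flag" (dGetD m "Rank" "")
    [dSet m "flag" (dGetD m "Rank" "")]
  | m0 :: m1 :: rest =>
    let tail := m1 :: rest
    let last := tail.getLastD []
    dSet m0 "Flag" (dGetD m0 "Rank" "")
      :: (tail.dropLast ++ [dSet last "flag" (dGetD last "Rank" "")])

-- ===== PRECONDITION & SPEC =====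
-- Pre_: the Python A returns normally iff the list is nonempty and every dict has a 'Rank' key
-- (otherwise IndexError / KeyError).
def Pre_CountRank (Musics : List (List (String × String))) : Prop :=
  Musics ≠ [] ∧ ∀ m ∈ Musics, (PySem.Dict.mk m).contains "Rank" = true
instance (Musics : List (List (String × String))) : Decidable (Pre_CountRank Musics) := by
  unfold Pre_CountRank; infer_instance
def pvWitness_CountRank : (List (List (String × String))) := [[("Rank", "S")], [("Rank", "A")]]

-- On lists whose first and last dicts have a 'Rank' key but some dict lacks it, A raises KeyError in
-- its scan loop while B returns the list with first['Flag'] and last['flag'] set.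
def Raises_CountRank (Musics : List (List (String × String))) : Prop :=
  Musics ≠ [] ∧
  (PySem.Dict.mk (Musics.headD [])).contains "Rank" = true ∧
  (PySem.Dict.mk (Musics.getLastD [])).contains "Rank" = true ∧
  ∃ m ∈ Musics, (PySem.Dict.mk m).contains "Rank" = false
instance (Musics : List (List (String × String))) : Decidable (Raises_CountRank Musics) := by
  unfold Raises_CountRank; infer_instance
def pvRaiseWitness_CountRank : (List (List (String × String))) :=
  [[("Rank", "S")], [("a", "b")], [("Rank", "A")]]
def pvRaiseWitnessOut_CountRank : List (List (String × String)) :=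
  [[("Rank", "S"), ("Flag", "S")], [("a", "b")], [("Rank", "A"), ("flag", "A")]]

def Spec_CountRank (Musics : List (List (String × String))) (out : List (List (String × String))) : Prop := out = CountRank_alt Musics
instance (Musics : List (List (String × String))) (out : List (List (String × String))) : Decidable (Spec_CountRank Musics out) := by unfold Spec_CountRank; infer_instance

-- ===== CLAIM (what is proved, stated in full; the proofs are below) =====
def Claim_equal_CountRank : Prop := ∀ (Musics : List (List (String × String))), Dom_CountRank Musics → Pre_CountRank Musics → Spec_CountRank Musics (CountRank Musics)
def Claim_raises_CountRank : Prop := (∀ (Musics : List (List (String × String))), Dom_CountRank Musics → Raises_CountRank Musics → ¬ Pre_CountRank Musics) ∧ (Dom_CountRank (pvRaiseWitness_CountRank) ∧ Raises_CountRank (pvRaiseWitness_CountRank) ∧ CountRank_alt (pvRaiseWitness_CountRank) = pvRaiseWitnessOut_CountRank)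

-- ===== LEMMAS AND PROOFS =====

-- A's loop body always leaves rank equal to the current element's 'Rank' (both branches do)
theorem rank_step (r : String) (mu : List (String × String)) :
    (if r ≠ dGetD mu "Rank" "" then dGetD mu "Rank" "" else r) = dGetD mu "Rank" "" := by
  split_ifs with h
  · rfl
  · exact not_ne_iff.mp h

-- hence the fold over a nonempty list returns the last element's 'Rank'
theorem foldl_rank_last (l : List (List (String × String))) (r : String) (h : l ≠ []) :
    l.foldl (fun r mu => if r ≠ dGetD mu "Rank" "" then dGetD mu "Rank" "" else r) r
      = dGetD (l.getLastD []) "Rank" "" := by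
  rw [show (fun (r : String) mu => if r ≠ dGetD mu "Rank" "" then dGetD mu "Rank" "" else r)
        = (fun _ mu => dGetD mu "Rank" "") from funext fun r => funext fun mu => rank_step r mu]
  induction l generalizing r with
  | nil => exact absurd rfl h
  | cons a t ih =>
    cases t with
    | nil => rfl
    | cons b u =>
      rw [List.foldl_cons, ih _ (by simp)]
      simp

-- inserting 'Flag' does not change the value looked up at 'Rank'
theorem getD_dSet_flag (m : List (String × String)) (v : String) :
    dGetD (dSet m "Flag" v) "Rank" "" = dGetD m "Rank" "" := by
  show ((PySem.Dict.mk m).insert "Flag" v).getD "Rank" "" = (PySem.Dict.mk m).getD "Rank" ""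
  rw [PySem.Dict.getD_insert]
  simp

-- ===== VERDICT (by name: the statement is the Claim_ definition above) =====
theorem CountRank_spec : Claim_equal_CountRank := by
  intro Musics _ _
  unfold Spec_CountRank CountRank CountRank_alt
  match Musics with
  | [] => rfl
  | [m] =>
    simp only [List.foldl, rank_step, getD_dSet_flag]
    rfl
  | m0 :: m1 :: rest =>
    simp only
    rw [foldl_rank_last _ _ (by simp)]
    simp

@[simp] theorem CountRank_raises : Claim_raises_CountRank := by
  unfold Claim_raises_CountRank
  refine ⟨?_, by decide⟩
  rintro Musics _ ⟨_, _, _, m, hm, hfalse⟩ ⟨_, hall⟩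
  have := hall m hm
  simp [this] at hfalse
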